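-- pv_equiv track=rewrite | github.com/williamseddon/testingEnv | reviewprompt.py | heuristic_predicted_rating
-- ===== SOURCE A (Python) =====
-- from typing import Optional, Dict, Tuple, Any, List
--
-- POS_HINTS = [
--     "love", "loved", "amazing", "excellent", "perfect", "great", "works great", "highly recommend",
--     "fantastic", "awesome", "best", "so good", "super happy", "five stars", "5 stars",
-- ]
--
-- NEG_HINTS = [
--     "hate", "hated", "terrible", "awful", "worst", "broken", "doesn't work", "didn't work", "stopped working",
--     "disappointed", "waste", "refund", "returned", "returning", "noisy", "loud", "1 star", "one star",
-- ]
--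
-- def heuristic_predicted_rating(text: str) -> Optional[int]:
--     if not isinstance(text, str) or not text.strip():
--         return None
--     t = text.lower()
--     pos = sum(1 for w in POS_HINTS if w in t)
--     neg = sum(1 for w in NEG_HINTS if w in t)
--
--     if pos == 0 and neg == 0:
--         return None
--
--     net = pos - neg
--     if net >= 3:
--         return 5
--     if net == 2:
--         return 4
--     if net in (0, 1, -1):
--         return 3
--     if net == -2:
--         return 2
--     return 1
-- ===== SOURCE B (Python) =====
-- from typing import Optional
--
-- POS_HINTS = [
--     "love", "loved", "amazing", "excellent", "perfect", "great", "works great", "highly recommend",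
--     "fantastic", "awesome", "best", "so good", "super happy", "five stars", "5 stars",
-- ]
--
-- NEG_HINTS = [
--     "hate", "hated", "terrible", "awful", "worst", "broken", "doesn't work", "didn't work", "stopped working",
--     "disappointed", "waste", "refund", "returned", "returning", "noisy", "loud", "1 star", "one star",
-- ]
--
-- ALL_HINTS = POS_HINTS + NEG_HINTS
--
-- def heuristic_predicted_rating(text: str) -> Optional[int]:
--     if not isinstance(text, str) or not text.strip():
--         return None
--     t = text.lower()
--     # Scan the text once, position by position, collecting the set of hints
--     # that start at each position (instead of one substring test per hint).
--     found = []
--     for i in range(len(t)):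
--         for w in ALL_HINTS:
--             if t.startswith(w, i) and w not in found:
--                 found.append(w)
--     if not found:
--         return None
--     net = 0
--     for w in found:
--         net += 1 if w in POS_HINTS else -1
--     return max(1, min(5, 3 + net - (net > 0) + (net < 0)))
-- ===== Notes on version B (the rewrite author's own statement) =====
-- stated objective: alternative
-- what changed: B inverts the traversal: instead of one substring test per hint (two counting passes over the hint lists), it scans the lowered text position by position, collecting into a deduplicated list every hint that starts at each position, then folds the collected hints' +/-1 weights into net and maps it with a single clamped closed form instead of the if/elif ladder.
import Mathlib
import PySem

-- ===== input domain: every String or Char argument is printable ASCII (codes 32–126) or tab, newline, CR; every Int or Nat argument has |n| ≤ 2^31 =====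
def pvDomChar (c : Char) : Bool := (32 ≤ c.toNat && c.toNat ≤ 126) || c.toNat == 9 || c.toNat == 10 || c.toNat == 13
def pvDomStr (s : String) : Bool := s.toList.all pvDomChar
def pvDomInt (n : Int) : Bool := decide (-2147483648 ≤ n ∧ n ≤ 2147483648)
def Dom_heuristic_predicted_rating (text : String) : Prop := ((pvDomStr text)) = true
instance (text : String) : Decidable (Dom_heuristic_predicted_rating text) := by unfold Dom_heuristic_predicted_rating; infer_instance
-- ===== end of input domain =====

-- B inverts the traversal: instead of one substring test per hint, it scans the text
-- position by position collecting the (deduplicated) hints that start there, then folds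
-- their ±1 weights and clamps; same results, alternative algorithm.

-- ===== PORT A =====
def POS_HINTS : List String := [
  "love", "loved", "amazing", "excellent", "perfect", "great", "works great", "highly recommend",
  "fantastic", "awesome", "best", "so good", "super happy", "five stars", "5 stars"]

def NEG_HINTS : List String := [
  "hate", "hated", "terrible", "awful", "worst", "broken", "doesn't work", "didn't work", "stopped working",
  "disappointed", "waste", "refund", "returned", "returning", "noisy", "loud", "1 star", "one star"]

def heuristic_predicted_rating (text : String) : Option Int :=
  if PySem.Str.strip text = "" then none
  else
    let t := PySem.Str.lower text
    let pos : Int := POS_HINTS.foldl (fun acc w => if PySem.Str.isIn w t then acc + 1 else acc) 0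
    let neg : Int := NEG_HINTS.foldl (fun acc w => if PySem.Str.isIn w t then acc + 1 else acc) 0
    if pos = 0 ∧ neg = 0 then none
    else
      let net := pos - neg
      if net ≥ 3 then some 5
      else if net = 2 then some 4
      else if net = 0 ∨ net = 1 ∨ net = -1 then some 3
      else if net = -2 then some 2
      else some 1

-- ===== PORT B =====
def ALL_HINTS : List String := POS_HINTS ++ NEG_HINTS

-- t.startswith(w, i): exact for the 0 ≤ i < len(t) produced by range(len(t))
def heuristic_predicted_rating_alt (text : String) : Option Int :=
  if PySem.Str.strip text = "" then none
  else
    let t := (PySem.Str.lower text).toList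
    let found : List String :=
      (PySem.List.pyRange 0 (t.length : Int) 1).foldl
        (fun s i => ALL_HINTS.foldl
          (fun s w =>
            if PySem.Chars.startswith (t.drop i.toNat) w.toList && !s.contains w
            then s ++ [w] else s) s) []
    if found = [] then none
    else
      let net : Int := found.foldl (fun n w => n + (if POS_HINTS.contains w then 1 else -1)) 0
      some (max 1 (min 5 (3 + net - (if net > 0 then 1 else 0) + (if net < 0 then 1 else 0))))

-- ===== PRECONDITION & SPEC =====
def Spec_heuristic_predicted_rating (text : String) (out : Option Int) : Prop := out = heuristic_predicted_rating_alt text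
instance (text : String) (out : Option Int) : Decidable (Spec_heuristic_predicted_rating text out) := by unfold Spec_heuristic_predicted_rating; infer_instance

-- ===== CLAIM (what is proved, stated in full; the proofs are below) =====
def Claim_equal_heuristic_predicted_rating : Prop := ∀ (text : String), Dom_heuristic_predicted_rating text → Spec_heuristic_predicted_rating text (heuristic_predicted_rating text)

-- ===== LEMMAS AND PROOFS =====

-- A's counting loop = length of the filtered list
lemma pv_foldl_count (f : String → Bool) (ws : List String) (c : Int) :
    ws.foldl (fun acc w => if f w then acc + 1 else acc) c = c + ((ws.filter f).length : Int) := by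
  induction ws generalizing c with
  | nil => simp
  | cons a l ih =>
    simp only [List.foldl_cons, List.filter_cons]
    by_cases h : f a = true
    · simp [h, ih]; ring
    · simp [h, ih]

-- one collecting step
lemma pv_mem_step (q : String → Bool) (a : String) (s : List String) (y : String) :
    y ∈ (if q a && !s.contains a then s ++ [a] else s) ↔ y ∈ s ∨ (y = a ∧ q a = true) := by
  split_ifs with h
  · simp only [Bool.and_eq_true, Bool.not_eq_eq_eq_not, Bool.not_true] at h
    simp only [List.mem_append, List.mem_singleton]
    tauto
  · simp only [Bool.and_eq_true, Bool.not_eq_eq_eq_not, Bool.not_true, not_and] at h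
    constructor
    · exact fun hy => Or.inl hy
    · rintro (hy | ⟨rfl, hq⟩)
      · exact hy
      · have hc : s.contains y = true := by
          cases hc : s.contains y
          · exact absurd hc (h hq)
          · rfl
        exact List.contains_iff_mem.mp hc

-- membership after B's inner (per-position) collecting fold
lemma pv_mem_inner (q : String → Bool) (ws : List String) (s : List String) (y : String) :
    y ∈ ws.foldl (fun s w => if q w && !s.contains w then s ++ [w] else s) s
      ↔ y ∈ s ∨ (y ∈ ws ∧ q y = true) := by
  induction ws generalizing s with
  | nil => simp
  | cons a l ih =>
    simp only [List.foldl_cons, ih, pv_mem_step, List.mem_cons]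
    constructor
    · rintro ((h | ⟨rfl, hq⟩) | ⟨hm, hy⟩)
      · exact Or.inl h
      · exact Or.inr ⟨Or.inl rfl, hq⟩
      · exact Or.inr ⟨Or.inr hm, hy⟩
    · rintro (h | ⟨(rfl | hm), hy⟩)
      · exact Or.inl (Or.inl h)
      · exact Or.inl (Or.inr ⟨rfl, hy⟩)
      · exact Or.inr ⟨hm, hy⟩

-- membership after B's outer (over all positions) fold
lemma pv_mem_outer (q : Int → String → Bool) (ws : List String) (ix : List Int)
    (s : List String) (y : String) :
    y ∈ ix.foldl (fun s i => ws.foldl (fun s w => if q i w && !s.contains w then s ++ [w] else s) s) s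
      ↔ y ∈ s ∨ ∃ i ∈ ix, y ∈ ws ∧ q i y = true := by
  induction ix generalizing s with
  | nil => simp
  | cons a l ih =>
    simp only [List.foldl_cons, ih, pv_mem_inner]
    constructor
    · rintro ((h | ⟨hm, hy⟩) | ⟨i, hi, h⟩)
      · exact Or.inl h
      · exact Or.inr ⟨a, List.mem_cons_self, hm, hy⟩
      · exact Or.inr ⟨i, List.mem_cons_of_mem _ hi, h⟩
    · rintro (h | ⟨i, hi, h⟩)
      · exact Or.inl (Or.inl h)
      · rcases List.mem_cons.mp hi with rfl | hi'
        · exact Or.inl (Or.inr h)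
        · exact Or.inr ⟨i, hi', h⟩

-- the collecting folds never create duplicates
lemma pv_nodup_inner (q : String → Bool) (ws : List String) (s : List String) (hs : s.Nodup) :
    (ws.foldl (fun s w => if q w && !s.contains w then s ++ [w] else s) s).Nodup := by
  induction ws generalizing s with
  | nil => exact hs
  | cons a l ih =>
    simp only [List.foldl_cons]
    by_cases h : (q a && !s.contains a) = true
    · simp only [h, if_true]
      refine ih _ ?_
      have hc : a ∉ s := by
        simp only [Bool.and_eq_true, Bool.not_eq_eq_eq_not, Bool.not_true] at h
        exact fun hm => by
          have hc := List.contains_iff_mem.mpr hm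
          rw [h.2] at hc
          exact Bool.false_ne_true hc
      exact List.Nodup.append hs (List.nodup_singleton a) (by simpa using hc)
    · simp only [h]; exact ih _ hs

lemma pv_nodup_outer (q : Int → String → Bool) (ws : List String) (ix : List Int)
    (s : List String) (hs : s.Nodup) :
    (ix.foldl (fun s i => ws.foldl (fun s w => if q i w && !s.contains w then s ++ [w] else s) s) s).Nodup := by
  induction ix generalizing s with
  | nil => exact hs
  | cons a l ih => exact ih _ (pv_nodup_inner _ _ _ hs)

-- a hint occurs starting at some scanned position iff it is a substring
lemma pv_exists_pos_iff_isIn (t : List Char) (w : String) (hw : w.toList ≠ []) :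
    (∃ i ∈ PySem.List.pyRange 0 (t.length : Int) 1,
        PySem.Chars.startswith (t.drop i.toNat) w.toList = true)
      ↔ PySem.Chars.isIn w.toList t = true := by
  rw [← PySem.Chars.exists_prefix_drop_iff_isIn]
  constructor
  · rintro ⟨i, _, hp⟩
    exact ⟨i.toNat, (PySem.Chars.startswith_iff _ _).mp hp⟩
  · rintro ⟨j, hp⟩
    have hlen : w.toList.length ≤ (t.drop j).length := hp.length_le
    have hj : j < t.length := by
      have : 0 < w.toList.length := List.length_pos_iff.mpr hw
      simp only [List.length_drop] at hlen
      omega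
    refine ⟨(j : Int), ?_, ?_⟩
    · rw [PySem.List.mem_pyRange_one]; omega
    · rw [PySem.Chars.startswith_iff]; simpa using hp

-- summing ±1 weights with an accumulator
lemma pv_foldl_weight (f : String → Int) (l : List String) (c : Int) :
    l.foldl (fun n w => n + f w) c = c + (l.map f).sum := by
  induction l generalizing c with
  | nil => simp
  | cons a l ih => simp [ih]; ring

-- sum of a constant over a list
lemma pv_sum_const (l : List String) (c : Int) (f : String → Int) (h : ∀ x ∈ l, f x = c) :
    (l.map f).sum = c * l.length := by
  induction l with
  | nil => simp
  | cons a t ih =>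
    simp only [List.map_cons, List.sum_cons, h a List.mem_cons_self,
      ih (fun x hx => h x (List.mem_cons_of_mem _ hx)), List.length_cons]
    push_cast; ring

-- A's ladder equals B's clamped closed form
lemma pv_ladder_clamp (net : Int) :
    (if net ≥ 3 then (5 : Int) else if net = 2 then 4
     else if net = 0 ∨ net = 1 ∨ net = -1 then 3
     else if net = -2 then 2 else 1)
      = max 1 (min 5 (3 + net - (if net > 0 then (1 : Int) else 0) + (if net < 0 then 1 else 0))) := by
  split_ifs <;> omega

-- fixed facts about the hint lists
lemma pv_all_nonempty : ∀ w ∈ ALL_HINTS, w.toList ≠ [] := by decide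

lemma pv_neg_not_pos : ∀ x ∈ NEG_HINTS, x ∉ POS_HINTS := by decide

-- ===== VERDICT (by name: the statement is the Claim_ definition above) =====
theorem heuristic_predicted_rating_spec : Claim_equal_heuristic_predicted_rating := by
  intro text _
  unfold Spec_heuristic_predicted_rating heuristic_predicted_rating heuristic_predicted_rating_alt
  by_cases hs : PySem.Str.strip text = ""
  · simp [hs]
  · simp only [hs, if_false]
    set t := (PySem.Str.lower text).toList with ht
    set q : Int → String → Bool := fun i w => PySem.Chars.startswith (t.drop i.toNat) w.toList with hq
    set found := (PySem.List.pyRange 0 (t.length : Int) 1).foldl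
        (fun s i => ALL_HINTS.foldl (fun s w => if q i w && !s.contains w then s ++ [w] else s) s)
        ([] : List String) with hfound
    set P : String → Bool := fun w => PySem.Chars.isIn w.toList t with hP
    have hmem : ∀ y, y ∈ found ↔ y ∈ ALL_HINTS ∧ P y = true := by
      intro y
      rw [hfound, pv_mem_outer]
      constructor
      · rintro (h | ⟨i, hi, hm, hy⟩)
        · simp at h
        · refine ⟨hm, ?_⟩
          exact (pv_exists_pos_iff_isIn t y (pv_all_nonempty y hm)).mp ⟨i, hi, hy⟩
      · rintro ⟨hm, hy⟩
        rcases (pv_exists_pos_iff_isIn t y (pv_all_nonempty y hm)).mpr hy with ⟨i, hi, hp⟩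
        exact Or.inr ⟨i, hi, hm, hp⟩
    have hnd : found.Nodup := pv_nodup_outer _ _ _ _ List.nodup_nil
    have hperm : found.Perm (ALL_HINTS.filter P) := by
      rw [List.perm_ext_iff_of_nodup hnd (List.Nodup.filter _ (by decide))]
      intro y; simp [hmem, List.mem_filter]
    -- A's counts
    have hpos : POS_HINTS.foldl (fun acc w => if PySem.Str.isIn w (PySem.Str.lower text) then acc + 1 else acc) 0
        = ((POS_HINTS.filter P).length : Int) := by
      rw [pv_foldl_count]
      simp only [hP]
      simp [PySem.Str.isIn_eq, ht]
    have hneg : NEG_HINTS.foldl (fun acc w => if PySem.Str.isIn w (PySem.Str.lower text) then acc + 1 else acc) 0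
        = ((NEG_HINTS.filter P).length : Int) := by
      rw [pv_foldl_count]
      simp only [hP]
      simp [PySem.Str.isIn_eq, ht]
    set a := (POS_HINTS.filter P).length with ha
    set b := (NEG_HINTS.filter P).length with hb
    -- B's net
    have hnet : found.foldl (fun n w => n + (if POS_HINTS.contains w then 1 else -1)) 0
        = (a : Int) - b := by
      rw [pv_foldl_weight]
      have := (hperm.map (fun w => if POS_HINTS.contains w then (1 : Int) else -1)).sum_eq
      rw [this]
      have hsplit : ALL_HINTS.filter P = POS_HINTS.filter P ++ NEG_HINTS.filter P := by
        simp [ALL_HINTS, List.filter_append]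
      rw [hsplit, List.map_append, List.sum_append]
      rw [pv_sum_const (POS_HINTS.filter P) 1 _ (by
        intro x hx
        have hxm : x ∈ POS_HINTS := (List.mem_filter.mp hx).1
        simp [hxm])]
      rw [pv_sum_const (NEG_HINTS.filter P) (-1) _ (by
        intro x hx
        have hxm : x ∈ NEG_HINTS := (List.mem_filter.mp hx).1
        simp [pv_neg_not_pos x hxm])]
      rw [← ha, ← hb]; ring
    have hempty : (found = []) ↔ ((a : Int) = 0 ∧ (b : Int) = 0) := by
      constructor
      · intro h
        have : ∀ w ∈ ALL_HINTS, P w = false := by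
          intro w hw
          by_contra hc
          have : w ∈ found := (hmem w).mpr ⟨hw, by simpa using hc⟩
          simp [h] at this
        constructor
        · have : POS_HINTS.filter P = [] := List.filter_eq_nil_iff.mpr (by
            intro w hw; simpa using this w (by simp [ALL_HINTS, hw]))
          simp [ha, this]
        · have : NEG_HINTS.filter P = [] := List.filter_eq_nil_iff.mpr (by
            intro w hw; simpa using this w (by simp [ALL_HINTS, hw]))
          simp [hb, this]
      · rintro ⟨h1, h2⟩
        rw [List.eq_nil_iff_forall_not_mem]
        intro y hy
        rcases (hmem y).mp hy with ⟨hmem', hPy⟩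
        have ha0 : POS_HINTS.filter P = [] := List.length_eq_zero_iff.mp (by exact_mod_cast h1)
        have hb0 : NEG_HINTS.filter P = [] := List.length_eq_zero_iff.mp (by exact_mod_cast h2)
        rcases List.mem_append.mp (by simpa [ALL_HINTS] using hmem') with h | h
        · have : y ∈ POS_HINTS.filter P := List.mem_filter.mpr ⟨h, hPy⟩
          simp [ha0] at this
        · have : y ∈ NEG_HINTS.filter P := List.mem_filter.mpr ⟨h, hPy⟩
          simp [hb0] at this
    simp only [hpos, hneg]
    by_cases hz : (a : Int) = 0 ∧ (b : Int) = 0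
    · simp [hz, hempty.mpr hz]
    · have hne : ¬(found = []) := fun h => hz (hempty.mp h)
      simp only [hz, if_false, hne, hnet]
      rw [← pv_ladder_clamp ((a : Int) - b)]
      split_ifs <;> rfl
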